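-- pv_equiv track=rewrite | github.com/Nghia03092004/nghia03092004.github.io | project_euler_unified/problem_925/solution.py | solve
-- ===== SOURCE A (Python) =====
-- def solve(n=100):
--     """Compute (p_n + q_n) mod 10^9+7 via linear recurrence."""
--     MOD = 10**9 + 7
--     p0, p1 = 1, 3
--     q0, q1 = 1, 2
--     for i in range(2, n + 1):
--         p0, p1 = p1, (2 * p1 + p0) % MOD
--         q0, q1 = q1, (2 * q1 + q0) % MOD
--     return (p1 + q1) % MOD
-- ===== SOURCE B (Python) =====
-- def solve(n=100):
--     """Compute (p_n + q_n) mod 10^9+7 via 2x2 matrix exponentiation.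
--
--     p and q satisfy the same recurrence x_{k+1} = 2 x_k + x_{k-1}, so their
--     sum s does too, with s_0 = 2, s_1 = 5; the answer is the first component
--     of M^(n-1) @ (5, 2) with M = [[2,1],[1,0]], computed by binary powering.
--     """
--     MOD = 10**9 + 7
--     if n < 1:
--         return 5
--     e = n - 1
--     a, b, c, d = 1, 0, 0, 1      # accumulator = identity
--     x, y, z, w = 2, 1, 1, 0      # base = M
--     while e:
--         if e & 1:
--             a, b, c, d = ((a*x + b*z) % MOD, (a*y + b*w) % MOD,
--                           (c*x + d*z) % MOD, (c*y + d*w) % MOD)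
--         x, y, z, w = ((x*x + y*z) % MOD, (x*y + y*w) % MOD,
--                       (z*x + w*z) % MOD, (z*y + w*w) % MOD)
--         e >>= 1
--     return (5*a + 2*b) % MOD
-- ===== Notes on version B (the rewrite author's own statement) =====
-- stated objective: faster
-- what changed: Replaced the O(n) step-by-step iteration of the two linear recurrences with binary exponentiation of the 2x2 companion matrix applied to the combined sequence s = p + q.
import Mathlib
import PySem

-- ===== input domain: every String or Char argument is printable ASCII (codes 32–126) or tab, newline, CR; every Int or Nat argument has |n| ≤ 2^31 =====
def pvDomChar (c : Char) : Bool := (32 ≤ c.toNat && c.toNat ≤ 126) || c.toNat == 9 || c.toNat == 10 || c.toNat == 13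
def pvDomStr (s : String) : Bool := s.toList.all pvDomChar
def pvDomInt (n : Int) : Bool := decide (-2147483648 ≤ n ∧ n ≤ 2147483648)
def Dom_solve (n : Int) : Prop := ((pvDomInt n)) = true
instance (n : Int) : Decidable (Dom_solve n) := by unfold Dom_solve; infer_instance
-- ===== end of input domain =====

-- B replaces A's O(n) linear-recurrence loop by binary exponentiation of the
-- 2x2 companion matrix applied to the combined sequence s = p + q (faster).


-- ===== PORT A =====
def solve (n : Int) : Int :=
  let st := (PySem.List.pyRange 2 (n+1) 1).foldl
    (fun (st : Int × Int × Int × Int) _ =>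
      (st.2.1, (2*st.2.1 + st.1) % 1000000007,
       st.2.2.2, (2*st.2.2.2 + st.2.2.1) % 1000000007))
    (1, 3, 1, 2)
  (st.2.1 + st.2.2.2) % 1000000007

-- ===== PORT B =====
-- one 2x2 matrix product modulo 10^9+7 (tuple order: a b c d row-major)
def pvMatMul (u v : Int × Int × Int × Int) : Int × Int × Int × Int :=
  ((u.1*v.1 + u.2.1*v.2.2.1) % 1000000007,
   (u.1*v.2.1 + u.2.1*v.2.2.2) % 1000000007,
   (u.2.2.1*v.1 + u.2.2.2*v.2.2.1) % 1000000007,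
   (u.2.2.1*v.2.1 + u.2.2.2*v.2.2.2) % 1000000007)

-- the `while e:` binary-powering loop of Source B
def pvPowLoop : Nat → (Int × Int × Int × Int) → (Int × Int × Int × Int) → (Int × Int × Int × Int)
  | 0, acc, _ => acc
  | e+1, acc, base =>
      pvPowLoop ((e+1)/2)
        (if (e+1) % 2 = 1 then pvMatMul acc base else acc)
        (pvMatMul base base)
  decreasing_by omega

def solve_alt (n : Int) : Int :=
  if n < 1 then 5
  else
    let r := pvPowLoop (n-1).toNat (1, 0, 0, 1) (2, 1, 1, 0)
    (5*r.1 + 2*r.2.1) % 1000000007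

-- ===== PRECONDITION & SPEC =====
def Spec_solve (n : Int) (out : Int) : Prop := out = solve_alt n
instance (n : Int) (out : Int) : Decidable (Spec_solve n out) := by unfold Spec_solve; infer_instance

-- ===== CLAIM (what is proved, stated in full; the proofs are below) =====
def Claim_equal_solve : Prop := ∀ (n : Int), Dom_solve n → Spec_solve n (solve n)

-- ===== LEMMAS AND PROOFS =====

-- shadow semantics over ZMod (10^9+7)
def pvM : Matrix (Fin 2) (Fin 2) (ZMod 1000000007) := !![2, 1; 1, 0]

def pvPhi (st : Int × Int × Int × Int) : Matrix (Fin 2) (Fin 2) (ZMod 1000000007) :=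
  !![(st.1 : ZMod 1000000007), (st.2.1 : ZMod 1000000007);
     (st.2.2.1 : ZMod 1000000007), (st.2.2.2 : ZMod 1000000007)]

theorem pvCast_mod (a : Int) :
    ((a % 1000000007 : Int) : ZMod 1000000007) = (a : ZMod 1000000007) := by
  simpa using ZMod.intCast_mod a 1000000007

theorem pvPhi_matMul (u v : Int × Int × Int × Int) :
    pvPhi (pvMatMul u v) = pvPhi u * pvPhi v := by
  ext i j
  fin_cases i <;> fin_cases j <;>
    simp [pvPhi, pvMatMul] <;>
    rw [pvCast_mod] <;> push_cast <;> ring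

theorem pvPhi_powLoop (e : Nat) (acc base : Int × Int × Int × Int) :
    pvPhi (pvPowLoop e acc base) = pvPhi acc * (pvPhi base) ^ e := by
  induction e using Nat.strong_induction_on generalizing acc base with
  | _ e ih =>
    match e with
    | 0 => simp [pvPowLoop]
    | e+1 =>
      rw [pvPowLoop, ih ((e+1)/2) (by omega)]
      have hacc : pvPhi (if (e+1) % 2 = 1 then pvMatMul acc base else acc)
          = pvPhi acc * (pvPhi base) ^ ((e+1) % 2) := by
        rcases Nat.mod_two_eq_zero_or_one (e+1) with h | h
        · rw [if_neg (by omega), h, pow_zero, mul_one]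
        · rw [if_pos h, pvPhi_matMul, h, pow_one]
      have he : (e+1) % 2 + 2 * ((e+1)/2) = e + 1 := by omega
      rw [hacc, pvPhi_matMul, mul_assoc, ← sq, ← pow_mul, ← pow_add, he]

-- A's loop body, and its k-fold iterate characterised by powers of pvM
def pvStepA (st : Int × Int × Int × Int) : Int × Int × Int × Int :=
  (st.2.1, (2*st.2.1 + st.1) % 1000000007,
   st.2.2.2, (2*st.2.2.2 + st.2.2.1) % 1000000007)

theorem pvFoldl_const {α β : Type} (f : α → α) (l : List β) (i : α) :
    l.foldl (fun s _ => f s) i = f^[l.length] i := by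
  induction l generalizing i with
  | nil => rfl
  | cons x xs ih => simp [ih, Function.iterate_succ_apply]

theorem pvIterA (k : Nat) :
    ((pvStepA^[k] (1, 3, 1, 2)).1 : ZMod 1000000007) = (pvM ^ k) 1 0 * 3 + (pvM ^ k) 1 1
    ∧ ((pvStepA^[k] (1, 3, 1, 2)).2.1 : ZMod 1000000007) = (pvM ^ k) 0 0 * 3 + (pvM ^ k) 0 1
    ∧ ((pvStepA^[k] (1, 3, 1, 2)).2.2.1 : ZMod 1000000007) = (pvM ^ k) 1 0 * 2 + (pvM ^ k) 1 1
    ∧ ((pvStepA^[k] (1, 3, 1, 2)).2.2.2 : ZMod 1000000007) = (pvM ^ k) 0 0 * 2 + (pvM ^ k) 0 1 := by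
  induction k with
  | zero =>
    simp
  | succ k ih =>
    obtain ⟨e1, e2, e3, e4⟩ := ih
    have h00 : (pvM ^ (k+1)) 0 0 = 2 * (pvM ^ k) 0 0 + (pvM ^ k) 1 0 := by
      rw [pow_succ']; simp [pvM, Matrix.mul_apply, Fin.sum_univ_two]
    have h01 : (pvM ^ (k+1)) 0 1 = 2 * (pvM ^ k) 0 1 + (pvM ^ k) 1 1 := by
      rw [pow_succ']; simp [pvM, Matrix.mul_apply, Fin.sum_univ_two]
    have h10 : (pvM ^ (k+1)) 1 0 = (pvM ^ k) 0 0 := by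
      rw [pow_succ']; simp [pvM, Matrix.mul_apply, Fin.sum_univ_two]
    have h11 : (pvM ^ (k+1)) 1 1 = (pvM ^ k) 0 1 := by
      rw [pow_succ']; simp [pvM, Matrix.mul_apply, Fin.sum_univ_two]
    rw [Function.iterate_succ_apply']
    refine ⟨?_, ?_, ?_, ?_⟩ <;> simp only [pvStepA, h00, h01, h10, h11]
    · rw [e2]
    · rw [pvCast_mod]; push_cast; rw [e1, e2]; ring
    · rw [e4]
    · rw [pvCast_mod]; push_cast; rw [e3, e4]; ring

theorem solve_eq_alt (n : Int) : solve n = solve_alt n := by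
  by_cases hn : n < 1
  · have hr : PySem.List.pyRange 2 (n+1) 1 = [] :=
      PySem.List.pyRange_one_eq_nil (by omega)
    simp only [solve, solve_alt, hr, if_pos hn, List.foldl_nil]
    norm_num
  · have hn1 : 1 ≤ n := by omega
    set k := (n-1).toNat with hk
    have hlen : (PySem.List.pyRange 2 (n+1) 1).length = k := by
      rw [PySem.List.length_pyRange_one]; omega
    have hA : solve n =
        ((pvStepA^[k] (1,3,1,2)).2.1 + (pvStepA^[k] (1,3,1,2)).2.2.2) % 1000000007 := by
      show (((PySem.List.pyRange 2 (n+1) 1).foldl (fun st _ => pvStepA st) (1,3,1,2)).2.1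
          + ((PySem.List.pyRange 2 (n+1) 1).foldl (fun st _ => pvStepA st) (1,3,1,2)).2.2.2)
          % 1000000007 = _
      rw [pvFoldl_const, hlen]
    have hB : solve_alt n =
        (5 * (pvPowLoop k (1,0,0,1) (2,1,1,0)).1
          + 2 * (pvPowLoop k (1,0,0,1) (2,1,1,0)).2.1) % 1000000007 := by
      simp only [solve_alt, if_neg (by omega : ¬ n < 1)]
      rw [hk]
    have hBphi : pvPhi (pvPowLoop k (1,0,0,1) (2,1,1,0)) = pvM ^ k := by
      rw [pvPhi_powLoop]
      have h1 : pvPhi (1,0,0,1) = 1 := by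
        rw [show pvPhi (1,0,0,1) = !![1,0;0,1] by simp [pvPhi], ← Matrix.one_fin_two]
      have h2 : pvPhi (2,1,1,0) = pvM := by simp [pvPhi, pvM]
      rw [h1, h2, one_mul]
    have ea : ((pvPowLoop k (1,0,0,1) (2,1,1,0)).1 : ZMod 1000000007) = (pvM ^ k) 0 0 := by
      simpa [pvPhi] using congrArg (fun m => m 0 0) hBphi
    have eb : ((pvPowLoop k (1,0,0,1) (2,1,1,0)).2.1 : ZMod 1000000007) = (pvM ^ k) 0 1 := by
      simpa [pvPhi] using congrArg (fun m => m 0 1) hBphi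
    have ep1 : ((pvStepA^[k] (1,3,1,2)).2.1 : ZMod 1000000007)
        = (pvM ^ k) 0 0 * 3 + (pvM ^ k) 0 1 := (pvIterA k).2.1
    have eq1 : ((pvStepA^[k] (1,3,1,2)).2.2.2 : ZMod 1000000007)
        = (pvM ^ k) 0 0 * 2 + (pvM ^ k) 0 1 := (pvIterA k).2.2.2
    have hcast : (((pvStepA^[k] (1,3,1,2)).2.1 + (pvStepA^[k] (1,3,1,2)).2.2.2 : Int)
          : ZMod 1000000007)
        = ((5 * (pvPowLoop k (1,0,0,1) (2,1,1,0)).1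
            + 2 * (pvPowLoop k (1,0,0,1) (2,1,1,0)).2.1 : Int) : ZMod 1000000007) := by
      push_cast
      rw [ep1, eq1, ea, eb]; ring
    have hmod := (ZMod.intCast_eq_intCast_iff' _ _ _).mp hcast
    rw [hA, hB]
    simpa [Int.ModEq] using hmod

-- ===== VERDICT (by name: the statement is the Claim_ definition above) =====
theorem solve_spec : Claim_equal_solve := by
  intro n _
  unfold Spec_solve
  exact solve_eq_alt n
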